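-- pv_equiv track=rewrite | github.com/M11203108/visual_nozzle | rs485_fire/src/MIX_test/spray_executor_node.py | segment_trajectory
-- ===== SOURCE A (Python) =====
-- def segment_trajectory(trajectory_list):
--     segments = []
--     current_pitch = None
--     current_segment = []
--
--     for pitch, yaw in trajectory_list:
--         if pitch != current_pitch:
--             if current_segment:
--                 segments.append((current_pitch, current_segment))
--             current_segment = []
--             current_pitch = pitch
--         current_segment.append(yaw)
--
--     if current_segment:
--         segments.append((current_pitch, current_segment))
--
--     return segments
-- ===== SOURCE B (Python) =====
-- def segment_trajectory(trajectory_list):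
--     pts = [(pitch, yaw) for pitch, yaw in trajectory_list]
--     n = len(pts)
--     starts = [i for i in range(n) if i == 0 or pts[i][0] != pts[i - 1][0]]
--     ends = starts[1:] + [n]
--     return [(pts[s][0], [yaw for _, yaw in pts[s:e]]) for s, e in zip(starts, ends)]
-- ===== Notes on version B (the rewrite author's own statement) =====
-- stated objective: alternative
-- what changed: Replaces A's single-pass state machine (current_pitch/current_segment buffer with two flush sites) by a staged index-based algorithm: first compute the list of boundary indices where pitch changes, then build each segment by slicing between consecutive boundaries.
import Mathlib
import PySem

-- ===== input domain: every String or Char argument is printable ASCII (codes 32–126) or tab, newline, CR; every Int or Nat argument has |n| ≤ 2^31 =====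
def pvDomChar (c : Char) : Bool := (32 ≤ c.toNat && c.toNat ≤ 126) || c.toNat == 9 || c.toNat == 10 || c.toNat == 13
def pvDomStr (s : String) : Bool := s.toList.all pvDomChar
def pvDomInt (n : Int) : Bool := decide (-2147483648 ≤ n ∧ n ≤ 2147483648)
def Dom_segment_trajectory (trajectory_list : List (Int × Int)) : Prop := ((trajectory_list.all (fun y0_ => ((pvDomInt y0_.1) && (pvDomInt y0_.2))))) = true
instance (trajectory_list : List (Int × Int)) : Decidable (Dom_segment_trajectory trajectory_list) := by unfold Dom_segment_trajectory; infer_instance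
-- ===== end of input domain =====

-- B replaces A's single-pass state machine by a staged index-based algorithm:
-- compute the boundary indices where pitch changes, then slice between them.

-- ===== PORT A =====
-- A's loop: state = (segments, current_pitch : Option Int, current_segment).
-- current_pitch is only read when current_segment ≠ [], where it is `some p`;
-- `.getD 0` is never the value actually appended on any reachable state.
def segLoopA : List (Int × Int) → List (Int × List Int) → Option Int → List Int → List (Int × List Int)
  | [], segments, cp, cur =>
      if cur = [] then segments else segments ++ [(cp.getD 0, cur)]
  | (p, y) :: rest, segments, cp, cur =>
      if some p ≠ cp then
        segLoopA rest (if cur = [] then segments else segments ++ [(cp.getD 0, cur)]) (some p) [y]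
      else
        segLoopA rest segments cp (cur ++ [y])

def segment_trajectory (trajectory_list : List (Int × Int)) : List (Int × List Int) :=
  segLoopA trajectory_list [] none []

-- ===== PORT B =====
-- Source B: pts = per-element 2-unpacked copy; starts = boundary indices; ends = starts[1:]+[n];
-- result = one (pitch, yaw-slice) per (start, end) pair. Every index pts[i], pts[i-1] (only
-- read when i ≥ 1) and pts[s] is in range, so pyGetD with a default is exact where Python indexes.
def segment_trajectory_alt (trajectory_list : List (Int × Int)) : List (Int × List Int) :=
  let pts := trajectory_list.map (fun pt => (pt.1, pt.2))
  let n : Int := PySem.List.len pts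
  let starts := (PySem.List.pyRange 0 n 1).filter (fun i =>
      i == 0 || !((PySem.List.pyGetD pts i (0, 0)).1 == (PySem.List.pyGetD pts (i - 1) (0, 0)).1))
  let ends := PySem.List.slice starts (some 1) none ++ [n]
  (starts.zip ends).map (fun se =>
      ((PySem.List.pyGetD pts se.1 (0, 0)).1,
       (PySem.List.slice pts (some se.1) (some se.2)).map (fun pt => pt.2)))

-- ===== PRECONDITION & SPEC =====
def Spec_segment_trajectory (trajectory_list : List (Int × Int)) (out : List (Int × List Int)) : Prop := out = segment_trajectory_alt trajectory_list
instance (trajectory_list : List (Int × Int)) (out : List (Int × List Int)) : Decidable (Spec_segment_trajectory trajectory_list out) := by unfold Spec_segment_trajectory; infer_instance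

-- ===== CLAIM (what is proved, stated in full; the proofs are below) =====
def Claim_equal_segment_trajectory : Prop := ∀ (trajectory_list : List (Int × Int)), Dom_segment_trajectory trajectory_list → Spec_segment_trajectory trajectory_list (segment_trajectory trajectory_list)

-- ===== LEMMAS AND PROOFS =====

-- Common reference point for both proofs: recursion on maximal runs of equal pitch.
def grp : List (Int × Int) → List (Int × List Int)
  | [] => []
  | (p, y) :: rest =>
      (p, y :: (rest.takeWhile (fun q => q.1 == p)).map Prod.snd)
        :: grp (rest.dropWhile (fun q => q.1 == p))
termination_by l => l.length
decreasing_by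
  simp only [List.length_cons]
  exact Nat.lt_succ_of_le (List.Sublist.length_le (List.dropWhile_sublist _))

-- Nat-index boundary predicate / boundary list, and the Nat-level form of B.
def natPred (l : List (Int × Int)) (k : Nat) : Bool :=
  k == 0 || !((l.getD k (0, 0)).1 == (l.getD (k - 1) (0, 0)).1)

def natStarts (l : List (Int × Int)) : List Nat :=
  (List.range l.length).filter (natPred l)

def natSeg (l : List (Int × Int)) : List (Int × List Int) :=
  ((natStarts l).zip ((natStarts l).drop 1 ++ [l.length])).map (fun se =>
    ((l.getD se.1 (0, 0)).1, ((l.drop se.1).take (se.2 - se.1)).map Prod.snd))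

-- ---- A equals grp ----
theorem segLoopA_eq (l : List (Int × Int)) :
    ∀ (segments : List (Int × List Int)) (p : Int) (cur : List Int), cur ≠ [] →
      segLoopA l segments (some p) cur =
        segments ++ (p, cur ++ (l.takeWhile (fun q => q.1 == p)).map Prod.snd)
          :: grp (l.dropWhile (fun q => q.1 == p)) := by
  induction l with
  | nil =>
      intro segments p cur hcur
      simp [segLoopA, hcur, grp]
  | cons hd tl ih =>
      intro segments p cur hcur
      obtain ⟨q, y⟩ := hd
      by_cases hq : q = p
      · subst hq
        have : ¬ (some q ≠ some q) := by simp
        simp only [segLoopA, this]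
        rw [ih segments q (cur ++ [y]) (by simp)]
        simp [List.takeWhile, List.dropWhile]
      · have hne : some q ≠ some p := by simpa using hq
        simp only [segLoopA, if_pos hne, if_neg hcur, Option.getD_some]
        rw [ih (segments ++ [(p, cur)]) q [y] (by simp)]
        have hbf : (q == p) = false := by simpa using hq
        have htw : ((⟨q, y⟩ : Int × Int) :: tl).takeWhile (fun r => r.1 == p) = [] := by
          simp [List.takeWhile, hbf]
        have hdw : ((⟨q, y⟩ : Int × Int) :: tl).dropWhile (fun r => r.1 == p)
            = (q, y) :: tl := by
          simp [List.dropWhile, hbf]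
        rw [htw, hdw]
        simp [grp]

theorem A_eq_grp (l : List (Int × Int)) : segment_trajectory l = grp l := by
  unfold segment_trajectory
  cases l with
  | nil => simp [segLoopA, grp]
  | cons hd tl =>
      obtain ⟨p, y⟩ := hd
      have h1 : (some p ≠ (none : Option Int)) := by simp
      simp only [segLoopA, if_pos h1]
      show segLoopA tl [] (some p) [y] = _
      rw [segLoopA_eq tl [] p [y] (by simp)]
      simp [grp]

-- ---- index facts about a run-decomposed list ----
theorem getD_append_run (r s : List (Int × Int)) (j : Nat) :
    (r ++ s).getD (r.length + j) (0, 0) = s.getD j (0, 0) := by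
  simp [List.getD_eq_getElem?_getD, List.getElem?_append_right (Nat.le_add_right r.length j)]

theorem getD_run_fst (r s : List (Int × Int)) (p : Int) (hall : ∀ x ∈ r, x.1 = p)
    (i : Nat) (hi : i < r.length) :
    ((r ++ s).getD i (0, 0)).1 = p := by
  rw [List.getD_eq_getElem?_getD, List.getElem?_append_left hi, List.getElem?_eq_getElem hi]
  exact hall _ (List.getElem_mem hi)

-- general fact about dropWhile (no library lemma found by exact?)
theorem dropWhile_cons_false {α : Type} (p : α → Bool) (l : List α) (x : α) (xs : List α)
    (h : l.dropWhile p = x :: xs) : p x = false := by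
  induction l with
  | nil => simp at h
  | cons a as ih =>
      by_cases ha : p a
      · rw [List.dropWhile_cons_of_pos ha] at h; exact ih h
      · rw [List.dropWhile_cons_of_neg ha] at h
        cases h
        simpa using ha

-- boundary list of `run ++ rest`: index 0, then rest's boundaries shifted by the run length
theorem natStarts_run (r s : List (Int × Int)) (p : Int)
    (hr : r ≠ []) (hall : ∀ x ∈ r, x.1 = p)
    (hs : ∀ x ∈ s.head?, x.1 ≠ p) :
    natStarts (r ++ s) = 0 :: (natStarts s).map (fun j => r.length + j) := by
  obtain ⟨k', hk⟩ : ∃ k', r.length = k' + 1 :=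
    ⟨r.length - 1, by have := List.length_pos_iff.mpr hr; omega⟩
  unfold natStarts
  rw [List.length_append, List.range_add, List.filter_append, List.filter_map]
  have h1 : (List.range r.length).filter (natPred (r ++ s)) = [0] := by
    rw [hk, List.range_succ_eq_map, List.filter_cons_of_pos (by simp [natPred])]
    rw [List.filter_map, List.filter_eq_nil_iff.mpr, List.map_nil]
    intro j hj
    have hj' : j < k' := List.mem_range.mp hj
    have e1 : ((r ++ s).getD (j + 1) (0, 0)).1 = p :=
      getD_run_fst r s p hall _ (by omega)
    have e2 : ((r ++ s).getD j (0, 0)).1 = p :=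
      getD_run_fst r s p hall _ (by omega)
    simp only [Function.comp_apply, natPred, Nat.succ_eq_add_one, Nat.add_sub_cancel]
    rw [e1, e2]
    simp
  have h2 : (List.range s.length).filter (natPred (r ++ s) ∘ (r.length + ·))
      = (List.range s.length).filter (natPred s) := by
    apply List.filter_congr
    intro j hj
    have hj' : j < s.length := List.mem_range.mp hj
    simp only [Function.comp]
    cases j with
    | zero =>
        obtain ⟨x, s', rfl⟩ : ∃ x s', s = x :: s' := by
          cases s with
          | nil => simp at hj'
          | cons a b => exact ⟨a, b, rfl⟩
        have hx : x.1 ≠ p := hs x (by simp)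
        have e1 : (r ++ x :: s').getD r.length (0, 0) = x := by
          have h0 := getD_append_run r (x :: s') 0
          rw [Nat.add_zero] at h0
          rw [h0, List.getD_cons_zero]
        have e2 : ((r ++ x :: s').getD (r.length - 1) (0, 0)).1 = p :=
          getD_run_fst r (x :: s') p hall _ (by omega)
        have hrhs : natPred (x :: s') 0 = true := by simp [natPred]
        rw [hrhs]
        simp only [natPred, Nat.add_zero]
        rw [show (r.length == 0) = false from by simp [hk], e1, e2]
        simp [hx]
    | succ j' =>
        have e1 : (r ++ s).getD (r.length + (j' + 1)) (0, 0) = s.getD (j' + 1) (0, 0) :=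
          getD_append_run r s (j' + 1)
        have e2 : (r ++ s).getD (r.length + j') (0, 0) = s.getD j' (0, 0) :=
          getD_append_run r s j'
        have hc : r.length + (j' + 1) - 1 = r.length + j' := by omega
        simp only [natPred, hc, Nat.add_sub_cancel]
        rw [e1, e2]
        rw [show (r.length + (j' + 1) == 0) = false from by simp,
            show ((j' + 1 : Nat) == 0) = false from by simp]
  rw [h1, h2]
  rfl

-- nonempty lists always start a segment at index 0
theorem natStarts_cons (x : Int × Int) (s : List (Int × Int)) :
    ∃ t, natStarts (x :: s) = 0 :: t := by
  unfold natStarts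
  rw [List.length_cons, List.range_succ_eq_map, List.filter_cons_of_pos (by simp [natPred])]
  exact ⟨_, rfl⟩

-- ---- B's Nat-level form equals grp ----
theorem natSeg_eq_grp (l : List (Int × Int)) : natSeg l = grp l := by
  induction l using grp.induct with
  | case1 => simp [natSeg, natStarts, grp]
  | case2 p y rest ih =>
      have hsplit : (p, y) :: rest
          = ((p, y) :: rest.takeWhile (fun q => q.1 == p)) ++ rest.dropWhile (fun q => q.1 == p) := by
        simp
      have hall : ∀ x ∈ (p, y) :: rest.takeWhile (fun q => q.1 == p), x.1 = p := by
        intro x hx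
        rcases List.mem_cons.mp hx with h | h
        · rw [h]
        · simpa using List.mem_takeWhile_imp h
      have hhead : ∀ x ∈ (rest.dropWhile (fun q => q.1 == p)).head?, x.1 ≠ p := by
        intro x hx
        cases hdwe : rest.dropWhile (fun q => q.1 == p) with
        | nil => rw [hdwe] at hx; simp at hx
        | cons z zs =>
            rw [hdwe] at hx
            simp only [List.head?_cons, Option.mem_def, Option.some.injEq] at hx
            subst hx
            simpa using dropWhile_cons_false _ rest z zs hdwe
      set tw := rest.takeWhile (fun q => q.1 == p) with htw
      set dw := rest.dropWhile (fun q => q.1 == p) with hdw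
      set r : List (Int × Int) := (p, y) :: tw with hrdef
      have hS : natStarts ((p, y) :: rest) = 0 :: (natStarts dw).map (fun j => r.length + j) := by
        rw [hsplit]
        exact natStarts_run r dw p (by simp [hrdef]) hall hhead
      cases hdwe : dw with
      | nil =>
          have hS0 : natStarts dw = [] := by rw [hdwe]; simp [natStarts]
          have hlen : ((p, y) :: rest).length = r.length := by rw [hsplit, hdwe]; simp
          have hself : (p, y) :: rest = r ++ [] := by rw [hsplit, hdwe]
          have htake : ((p, y) :: rest).take r.length = r := by
            conv_lhs => rw [hself]
            exact List.take_left
          unfold natSeg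
          rw [hS, hS0, List.map_nil, hlen]
          simp only [grp]
          rw [← htw, ← hdw, hdwe]
          simp only [List.drop_one, List.tail_cons, List.nil_append, List.zip_cons_cons,
            List.zip_nil_right, List.map_cons, List.map_nil, List.drop_zero, Nat.sub_zero,
            List.getD_cons_zero, grp]
          rw [htake, hrdef]
          simp
      | cons z zs =>
          obtain ⟨t, hT⟩ := natStarts_cons z zs
          rw [← hdwe] at hT
          have hlen : ((p, y) :: rest).length = r.length + dw.length := by
            rw [hsplit]; simp
          have hzip : ((r.length :: t.map (fun j => r.length + j)).zip
                ((t.map (fun j => r.length + j)) ++ [r.length + dw.length]))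
              = ((0 :: t).zip (t ++ [dw.length])).map
                  (fun se => (r.length + se.1, r.length + se.2)) := by
            have hm2 : (t.map (fun j => r.length + j)) ++ [r.length + dw.length]
                = ((t ++ [dw.length]).map (fun j => r.length + j)) := by
              rw [List.map_append]; rfl
            have hm1 : (r.length :: t.map (fun j => r.length + j))
                = ((0 :: t).map (fun j => r.length + j)) := by simp
            rw [hm2, hm1, List.zip_map]
            rfl
          have hF0 : ((p, y) :: rest).take r.length = r := by
            conv_lhs => rw [hsplit]
            exact List.take_left
          have hFcomp : ∀ se : Nat × Nat,
              ((((p, y) :: rest).getD (r.length + se.1) (0, 0)).1,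
                ((((p, y) :: rest).drop (r.length + se.1)).take
                  ((r.length + se.2) - (r.length + se.1))).map Prod.snd)
              = (((dw.getD se.1 (0, 0)).1,
                  ((dw.drop se.1).take (se.2 - se.1)).map Prod.snd)) := by
            intro se
            have e1 : ((p, y) :: rest).getD (r.length + se.1) (0, 0) = dw.getD se.1 (0, 0) := by
              rw [hsplit]; exact getD_append_run r dw se.1
            have e2 : ((p, y) :: rest).drop (r.length + se.1) = dw.drop se.1 := by
              rw [hsplit]; exact List.drop_length_add_append se.1
            have e3 : (r.length + se.2) - (r.length + se.1) = se.2 - se.1 := by omega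
            rw [e1, e2, e3]
          unfold natSeg
          rw [hS, hT, hlen]
          simp only [grp]
          rw [← htw, ← hdw, ← ih]
          simp only [List.map_cons, Nat.add_zero, List.drop_one, List.tail_cons,
            List.cons_append, List.zip_cons_cons, List.map_cons]
          rw [hzip, List.map_map]
          congr 1
          · simp only [List.drop_zero, Nat.sub_zero, List.getD_cons_zero]
            rw [hF0, hrdef]
            simp
          · unfold natSeg
            rw [hT]
            simp only [List.drop_one, List.tail_cons]
            apply List.map_congr_left
            intro se _
            simp only [Function.comp_apply]
            exact hFcomp se

-- ---- B equals its Nat-level form ----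
theorem B_eq_natSeg (l : List (Int × Int)) : segment_trajectory_alt l = natSeg l := by
  have hpts : l.map (fun pt : Int × Int => (pt.1, pt.2)) = l := by simp
  have hstarts : ((PySem.List.pyRange 0 (l.length : Int) 1).filter (fun i =>
        i == 0 || !((PySem.List.pyGetD l i ((0 : Int), (0 : Int))).1 ==
          (PySem.List.pyGetD l (i - 1) ((0 : Int), (0 : Int))).1)))
      = (natStarts l).map (fun k : Nat => (k : Int)) := by
    rw [PySem.List.pyRange_one]
    simp only [sub_zero, Int.toNat_natCast, zero_add]
    rw [List.filter_map]
    unfold natStarts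
    congr 1
    apply List.filter_congr
    intro j hj
    cases j with
    | zero => simp [natPred]
    | succ j' =>
        have hc : ((j' + 1 : Nat) : Int) - 1 = ((j' : Nat) : Int) := by push_cast; ring
        simp only [Function.comp_apply, natPred, hc, PySem.List.pyGetD_natCast,
          Nat.add_sub_cancel]
        simp
        intro h
        exfalso
        omega
  simp only [segment_trajectory_alt, PySem.List.len_eq]
  rw [hpts, hstarts, PySem.List.slice_from_one, ← List.map_tail]
  rw [show ([(l.length : Int)]) = List.map (fun k : Nat => (k : Int)) [l.length] from rfl]
  rw [← List.map_append, List.zip_map, List.map_map]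
  unfold natSeg
  rw [← List.drop_one]
  congr 1
  funext se
  obtain ⟨a, b⟩ := se
  simp only [Function.comp_apply, Prod.map_apply, PySem.List.slice_natCast,
    PySem.List.pyGetD_natCast]

-- ===== VERDICT (by name: the statement is the Claim_ definition above) =====
theorem segment_trajectory_spec : Claim_equal_segment_trajectory := by
  intro l _
  unfold Spec_segment_trajectory
  rw [A_eq_grp, B_eq_natSeg, natSeg_eq_grp]
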